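-- pv_equiv track=rewrite | github.com/shuiguaihan/embedded-hmi-workflows | shared/handoff/lint_handoff_size.py | count_command_lines
-- ===== SOURCE A (Python) =====
-- def count_command_lines(lines: list[str]) -> int:
--     inside = False
--     count = 0
--     for line in lines:
--         stripped = line.strip()
--         if stripped.startswith("```"):
--             inside = not inside
--             continue
--         if inside and stripped and not stripped.startswith("#"):
--             count += 1
--     return count
-- ===== SOURCE B (Python) =====
-- def count_command_lines(lines: list[str]) -> int:
--     # Parse the fence structure first: split the stripped lines into segments
--     # delimited by ``` fences, then sum the non-blank non-comment lines of the
--     # odd-indexed (inside-fence) segments.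
--     segments = []
--     cur = []
--     for line in lines:
--         s = line.strip()
--         if s.startswith("```"):
--             segments.append(cur)
--             cur = []
--         else:
--             cur.append(s)
--     segments.append(cur)
--     total = 0
--     for i, seg in enumerate(segments):
--         if i % 2 == 1:
--             total += sum(1 for s in seg if s and not s.startswith("#"))
--     return total
-- ===== Notes on version B (the rewrite author's own statement) =====
-- stated objective: alternative
-- what changed: B parses the fence structure first, splitting the stripped lines into fence-delimited segments and summing the counts of the odd-indexed (inside) segments, instead of A's running inside/outside toggle with a single counter.
import Mathlib
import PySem

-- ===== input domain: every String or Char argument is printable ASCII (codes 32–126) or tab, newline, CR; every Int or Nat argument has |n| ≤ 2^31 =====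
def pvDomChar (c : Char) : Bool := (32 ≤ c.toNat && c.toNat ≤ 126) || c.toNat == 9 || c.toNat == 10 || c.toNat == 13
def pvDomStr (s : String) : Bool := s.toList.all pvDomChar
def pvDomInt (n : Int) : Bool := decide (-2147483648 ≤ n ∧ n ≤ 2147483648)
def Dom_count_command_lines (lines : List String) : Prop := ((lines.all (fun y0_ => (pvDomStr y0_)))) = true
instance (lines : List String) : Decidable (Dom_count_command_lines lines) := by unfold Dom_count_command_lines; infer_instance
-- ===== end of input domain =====

-- B replaces A's running inside/outside toggle by a parse-first decomposition:
-- split into fence-delimited segments, then sum the odd-indexed segments.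

-- ===== PORT A =====
def count_command_lines (lines : List String) : Int :=
  (lines.foldl (fun (st : Bool × Int) line =>
    let stripped := PySem.Str.strip line
    if PySem.Str.startswith stripped "```" then (!st.1, st.2)
    else if st.1 && (PySem.Str.len stripped != 0) && !PySem.Str.startswith stripped "#" then
      (st.1, st.2 + 1)
    else st) (false, 0)).2

-- ===== PORT B =====
def fenceB (s : String) : Bool := PySem.Str.startswith s "```"
def keepB (s : String) : Bool := (PySem.Str.len s != 0) && !PySem.Str.startswith s "#"

def count_command_lines_alt (lines : List String) : Int :=
  let p := lines.foldl (fun (st : List (List String) × List String) line =>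
      let s := PySem.Str.strip line
      if fenceB s then (st.1 ++ [st.2], []) else (st.1, st.2 ++ [s])) ([], [])
  let segments := p.1 ++ [p.2]
  (PySem.List.enumerate segments 0).foldl
    (fun total iseg =>
      if PySem.Int.mod iseg.1 2 == 1 then
        total + ((iseg.2.filter (fun s => keepB s)).map (fun _ => (1 : Int))).sum
      else total) 0

-- ===== PRECONDITION & SPEC =====
def Spec_count_command_lines (lines : List String) (out : Int) : Prop := out = count_command_lines_alt lines
instance (lines : List String) (out : Int) : Decidable (Spec_count_command_lines lines out) := by unfold Spec_count_command_lines; infer_instance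

-- ===== CLAIM (what is proved, stated in full; the proofs are below) =====
def Claim_equal_count_command_lines : Prop := ∀ (lines : List String), Dom_count_command_lines lines → Spec_count_command_lines lines (count_command_lines lines)

-- ===== LEMMAS AND PROOFS =====

/-- A's loop body, named for the proofs (definitionally the lambda in the port). -/
def stepA (st : Bool × Int) (line : String) : Bool × Int :=
  let stripped := PySem.Str.strip line
  if PySem.Str.startswith stripped "```" then (!st.1, st.2)
  else if st.1 && (PySem.Str.len stripped != 0) && !PySem.Str.startswith stripped "#" then
    (st.1, st.2 + 1)
  else st

/-- B's segment-building loop body, named for the proofs. -/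
def stepB (st : List (List String) × List String) (line : String) : List (List String) × List String :=
  let s := PySem.Str.strip line
  if fenceB s then (st.1 ++ [st.2], []) else (st.1, st.2 ++ [s])

/-- Count of kept lines in one segment (B's inner sum). -/
def segSum (seg : List String) : Int :=
  ((seg.filter (fun s => keepB s)).map (fun _ => (1 : Int))).sum

/-- Sum of segSum over the segments at "odd" positions; `b` = current position is odd. -/
def oddSumFrom (b : Bool) : List (List String) → Int
  | [] => 0
  | x :: r => (if b then segSum x else 0) + oddSumFrom (!b) r

theorem parity_succ (n : Nat) : decide ((n + 1) % 2 = 1) = !decide (n % 2 = 1) := by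
  rcases Nat.mod_two_eq_zero_or_one n with h | h <;> simp [Nat.add_mod, h]

theorem oddSumFrom_append_singleton (b : Bool) (xs : List (List String)) (y : List String) :
    oddSumFrom b (xs ++ [y]) =
      oddSumFrom b xs + (if (b != decide (xs.length % 2 = 1)) then segSum y else 0) := by
  induction xs generalizing b with
  | nil => cases b <;> simp [oddSumFrom]
  | cons x r ih =>
    simp only [List.cons_append, oddSumFrom, ih (!b), List.length_cons]
    rcases Nat.mod_two_eq_zero_or_one r.length with h | h <;> cases b <;>
      simp [Nat.add_mod, h] <;> ring

/-- B's enumerate-fold equals oddSumFrom. -/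
theorem enum_fold_eq_oddSumFrom (segs : List (List String)) (n : Nat) (t : Int) :
    (PySem.List.enumerate segs (n : Int)).foldl
      (fun total iseg =>
        if PySem.Int.mod iseg.1 2 == 1 then
          total + ((iseg.2.filter (fun s => keepB s)).map (fun _ => (1 : Int))).sum
        else total) t
    = t + oddSumFrom (decide (n % 2 = 1)) segs := by
  induction segs generalizing n t with
  | nil => simp [PySem.List.enumerate_nil, oddSumFrom]
  | cons x r ih =>
    rw [PySem.List.enumerate_cons]
    simp only [List.foldl_cons]
    have hcast : ((n : Int) + 1) = ((n + 1 : Nat) : Int) := by push_cast; ring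
    rw [hcast, ih (n + 1), parity_succ]
    rcases Nat.mod_two_eq_zero_or_one n with h2 | h2
    · have hm' : ¬ ((n : Int) % 2 = 1) := by omega
      simp [oddSumFrom, segSum, h2, hm']
    · have hm' : ((n : Int) % 2 = 1) := by omega
      simp [oddSumFrom, segSum, h2, hm']
      ring

/-- The value B would report from the current fold state. -/
def Gval (segs : List (List String)) (cur : List String) : Int :=
  oddSumFrom false segs + (if decide (segs.length % 2 = 1) then segSum cur else 0)

theorem parity_append (segs : List (List String)) (cur : List String) :
    (!(decide (segs.length % 2 = 1))) = decide ((segs ++ [cur]).length % 2 = 1) := by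
  simp only [List.length_append, List.length_cons, List.length_nil]
  rw [parity_succ]

theorem Gval_fence (segs : List (List String)) (cur : List String) :
    Gval (segs ++ [cur]) [] = Gval segs cur := by
  simp [Gval, oddSumFrom_append_singleton, segSum]

theorem segSum_append_singleton (cur : List String) (s : String) :
    segSum (cur ++ [s]) = segSum cur + (if keepB s then 1 else 0) := by
  by_cases h : keepB s <;> simp [segSum, List.filter_append, h]

theorem stepA_fence (b : Bool) (c : Int) (line : String)
    (hf : PySem.Str.startswith (PySem.Str.strip line) "```" = true) :
    stepA (b, c) line = (!b, c) := by
  simp only [stepA, hf]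
  simp

theorem stepA_nofence (b : Bool) (c : Int) (line : String)
    (hf : PySem.Str.startswith (PySem.Str.strip line) "```" = false) :
    stepA (b, c) line = (b, if b && keepB (PySem.Str.strip line) then c + 1 else c) := by
  simp only [stepA, hf]
  cases b <;> simp [keepB] <;> split_ifs <;> simp_all

theorem stepB_fence (segs : List (List String)) (cur : List String) (line : String)
    (hf : fenceB (PySem.Str.strip line) = true) :
    stepB (segs, cur) line = (segs ++ [cur], []) := by
  simp [stepB, hf]

theorem stepB_nofence (segs : List (List String)) (cur : List String) (line : String)
    (hf : fenceB (PySem.Str.strip line) = false) :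
    stepB (segs, cur) line = (segs, cur ++ [PySem.Str.strip line]) := by
  simp [stepB, hf]

theorem Gval_push (segs : List (List String)) (cur : List String) (s : String) :
    Gval segs (cur ++ [s]) =
      (if decide (segs.length % 2 = 1) && keepB s then Gval segs cur + 1 else Gval segs cur) := by
  cases hp : decide (segs.length % 2 = 1) <;> by_cases hk : keepB s <;>
    simp [Gval, segSum_append_singleton, hp, hk] <;> ring

/-- Main loop invariant: A's fold, started at B's current parity and value,
    lands on B's value for B's final fold state. -/
theorem main_loop (lines : List String) (segs : List (List String)) (cur : List String) :
    (lines.foldl stepA (decide (segs.length % 2 = 1), Gval segs cur)).2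
    = Gval (lines.foldl stepB (segs, cur)).1 (lines.foldl stepB (segs, cur)).2 := by
  induction lines generalizing segs cur with
  | nil => rfl
  | cons line rest ih =>
    rw [List.foldl_cons, List.foldl_cons]
    by_cases hf : fenceB (PySem.Str.strip line)
    · rw [stepA_fence _ _ _ (by simpa [fenceB] using hf), stepB_fence _ _ _ hf,
        parity_append segs cur, ← Gval_fence segs cur]
      exact ih (segs ++ [cur]) []
    · have hf' : fenceB (PySem.Str.strip line) = false := by simpa using hf
      rw [stepA_nofence _ _ _ (by simpa [fenceB] using hf'), stepB_nofence _ _ _ hf']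
      have := ih segs (cur ++ [PySem.Str.strip line])
      rw [Gval_push] at this
      exact this

-- ===== VERDICT (by name: the statement is the Claim_ definition above) =====
theorem count_command_lines_spec : Claim_equal_count_command_lines := by
  intro lines _
  unfold Spec_count_command_lines count_command_lines count_command_lines_alt
  show (lines.foldl stepA (false, 0)).2 = _
  have h0 : ((false : Bool), (0 : Int))
      = (decide (([] : List (List String)).length % 2 = 1), Gval [] []) := by
    simp [Gval, oddSumFrom]
  rw [h0, main_loop lines [] []]
  show _ = (PySem.List.enumerate _ ((0 : Nat) : Int)).foldl _ 0
  rw [enum_fold_eq_oddSumFrom]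
  have hd : lines.foldl (fun (st : List (List String) × List String) line =>
      let s := PySem.Str.strip line
      if fenceB s then (st.1 ++ [st.2], []) else (st.1, st.2 ++ [s])) ([], [])
    = lines.foldl stepB ([], []) := rfl
  rw [hd]
  simp [Gval, oddSumFrom_append_singleton]
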